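-- pv_equiv track=rewrite | github.com/curnurx/Boramae | solution.py | solution
-- ===== SOURCE A (Python) =====
-- def solution(diffs, times, limit):
--
--     def calc(x):
--         y = 0
--         for i in range(len(diffs)):
--             if i > 0:
--                 prev = times[i - 1]
--             else:
--                 prev = 0
--             diff = diffs[i]
--             time = times[i]
--             y += max(0, (diff - x)) * (prev + time) + time
--         return y <= limit
--
--     if calc(1):
--         return 1
--     left, right = 1, 100000
--     while left + 1 != right:
--         mid = (left + right) >> 1
--         if calc(mid):
--             right = mid
--         else:
--             left = mid
--
--
--     return right
-- ===== SOURCE B (Python) =====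
-- def solution(diffs, times, limit):
--
--     def calc(x):
--         y = 0
--         for i in range(len(diffs)):
--             if i > 0:
--                 prev = times[i - 1]
--             else:
--                 prev = 0
--             diff = diffs[i]
--             time = times[i]
--             y += max(0, (diff - x)) * (prev + time) + time
--         return y <= limit
--
--     for x in range(1, 100001):
--         if calc(x):
--             return x
--     return 100000
-- ===== Notes on version B (the rewrite author's own statement) =====
-- stated objective: simpler
-- what changed: Replaced A's binary search over [1,100000] with a linear scan that returns the first level x with calc(x) true (falling through to 100000), keeping the calc predicate itself unchanged.
-- outside the precondition, e.g. on solution([2, 3], [5], 10): A raises IndexError, B raises IndexError; on solution([8, 4], [-4, 9], -10): A returns 100000, B returns 3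
import Mathlib
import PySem

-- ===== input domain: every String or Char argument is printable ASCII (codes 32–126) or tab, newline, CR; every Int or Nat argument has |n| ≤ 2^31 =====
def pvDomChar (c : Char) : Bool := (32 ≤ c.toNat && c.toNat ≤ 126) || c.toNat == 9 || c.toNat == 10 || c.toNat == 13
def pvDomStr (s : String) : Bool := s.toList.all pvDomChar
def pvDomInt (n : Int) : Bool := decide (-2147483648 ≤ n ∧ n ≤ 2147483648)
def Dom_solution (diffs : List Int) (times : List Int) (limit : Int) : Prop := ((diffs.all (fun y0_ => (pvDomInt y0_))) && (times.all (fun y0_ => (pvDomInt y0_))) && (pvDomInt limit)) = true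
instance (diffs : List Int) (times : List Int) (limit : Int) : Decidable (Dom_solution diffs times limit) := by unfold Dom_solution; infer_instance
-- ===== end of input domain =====

-- B replaces A's binary search over [1, 100000] with a linear scan returning the first level
-- satisfying the same `calc` predicate (objective: simpler; not faster).

-- ===== PORT A =====
-- the nested helper `calc` of A (B's Python keeps it verbatim, so both ports share it);
-- times[i-1] / times[i] ported with pyGetD (default 0): exact whenever the index is in range,
-- which Pre_solution guarantees for every index `calc` touches
def pvCalc (diffs times : List Int) (limit x : Int) : Bool :=
  decide (List.foldl (fun y i =>
      let prev : Int := if i > 0 then PySem.List.pyGetD times (i - 1) 0 else 0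
      let diff : Int := PySem.List.pyGetD diffs i 0
      let time : Int := PySem.List.pyGetD times i 0
      y + max 0 (diff - x) * (prev + time) + time)
    0 (PySem.List.pyRange 0 (diffs.length : Int) 1) ≤ limit)

-- A's while loop; fuel bounds the iteration count (the loop shrinks right-left every step,
-- so fuel 100000 is never exhausted from the initial interval [1, 100000])
def pvLoopA (c : Int → Bool) : Nat → Int → Int → Int
  | 0, _, right => right
  | fuel + 1, left, right =>
    if left + 1 = right then right
    else
      let mid := (left + right) >>> (1 : Nat)   -- Python's (left + right) >> 1
      if c mid then pvLoopA c fuel left mid else pvLoopA c fuel mid right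

def solution (diffs : List Int) (times : List Int) (limit : Int) : Int :=
  if pvCalc diffs times limit 1 then 1
  else pvLoopA (pvCalc diffs times limit) 100000 1 100000

-- ===== PORT B =====
-- `for x in range(1, 100001): if calc(x): return x` then `return 100000`;
-- fuel 100000 = the exact length of range(1, 100001), falling through to 100000
def pvScanB (c : Int → Bool) : Nat → Int → Int
  | 0, _ => 100000
  | fuel + 1, x => if c x then x else pvScanB c fuel (x + 1)

def solution_alt (diffs : List Int) (times : List Int) (limit : Int) : Int :=
  pvScanB (pvCalc diffs times limit) 100000 1

-- ===== PRECONDITION & SPEC =====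
-- Pre_ (i) excludes inputs where `calc` raises IndexError (len(times) < len(diffs)), and
-- (ii) restricts to the problem's natural domain of nonnegative times (among the first
-- len(diffs) entries, the only ones read): with a negative time the predicate is not
-- monotone in the level and A's binary-search crossover is an accident of bisection order.
def Pre_solution (diffs : List Int) (times : List Int) (limit : Int) : Prop :=
  diffs.length ≤ times.length ∧ ∀ t ∈ times.take diffs.length, 0 ≤ t
instance (diffs : List Int) (times : List Int) (limit : Int) : Decidable (Pre_solution diffs times limit) := by unfold Pre_solution; infer_instance

def pvWitness_solution : List Int × List Int × Int := ([2, 3], [1, 1], 100)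

def Spec_solution (diffs : List Int) (times : List Int) (limit : Int) (out : Int) : Prop := out = solution_alt diffs times limit
instance (diffs : List Int) (times : List Int) (limit : Int) (out : Int) : Decidable (Spec_solution diffs times limit out) := by unfold Spec_solution; infer_instance

-- ===== CLAIM (what is proved, stated in full; the proofs are below) =====
def Claim_equal_solution : Prop := ∀ (diffs : List Int) (times : List Int) (limit : Int), Dom_solution diffs times limit → Pre_solution diffs times limit → Spec_solution diffs times limit (solution diffs times limit)

-- ===== LEMMAS AND PROOFS =====

-- first x in [a, b) with c x, else b (proof-side characterisation of both loops)
def pvFirst (c : Int → Bool) (a b : Int) : Int :=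
  if h : a < b then (if c a then a else pvFirst c (a + 1) b) else b
termination_by (b - a).toNat
decreasing_by omega

theorem pvFirst_of_ge (c : Int → Bool) (a b : Int) (h : b ≤ a) : pvFirst c a b = b := by
  unfold pvFirst; simp [Int.not_lt.mpr h]

theorem pvFirst_of_lt (c : Int → Bool) (a b : Int) (h : a < b) :
    pvFirst c a b = if c a then a else pvFirst c (a + 1) b := by
  rw [pvFirst]; simp [h]

-- scanning [a, m) with fallback m equals scanning [a, b) with fallback b when c m holds
theorem pvFirst_cut (c : Int → Bool) (m b : Int) (hc : c m = true) (hmb : m ≤ b) :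
    ∀ k (a : Int), (m - a).toNat = k → a ≤ m → pvFirst c a m = pvFirst c a b := by
  intro k
  induction k with
  | zero =>
    intro a hk ha
    have ham : a = m := by omega
    subst ham
    rw [pvFirst_of_ge c a a le_rfl]
    rcases lt_or_eq_of_le hmb with h | h
    · rw [pvFirst_of_lt c a b h, hc]; simp
    · rw [← h, pvFirst_of_ge c a a le_rfl]
  | succ k ih =>
    intro a hk ha
    have ham : a < m := by omega
    rw [pvFirst_of_lt c a m ham, pvFirst_of_lt c a b (by omega)]
    by_cases hca : c a = true
    · simp [hca]
    · simp only [eq_false_of_ne_true hca]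
      exact ih (a + 1) (by omega) (by omega)

-- a false prefix can be skipped
theorem pvFirst_skip (c : Int → Bool) (b : Int) :
    ∀ k (a a' : Int), (a' - a).toNat = k → a ≤ a' →
      (∀ x, a ≤ x → x < a' → c x = false) → pvFirst c a b = pvFirst c a' b := by
  intro k
  induction k with
  | zero =>
    intro a a' hk ha _
    have : a = a' := by omega
    rw [this]
  | succ k ih =>
    intro a a' hk ha hfalse
    have haa : a < a' := by omega
    by_cases hab : a < b
    · rw [pvFirst_of_lt c a b hab, hfalse a le_rfl haa]
      simp only [Bool.false_eq_true, if_false]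
      exact ih (a + 1) a' (by omega) (by omega) (fun x hx hx' => hfalse x (by omega) hx')
    · rw [pvFirst_of_ge c a b (by omega)]
      by_cases hab' : a' < b
      · omega
      · rw [pvFirst_of_ge c a' b (by omega)]

-- A's binary search, started with c left = false, computes pvFirst c (left+1) right
-- (monotonicity of c is used exactly on the `else` branch)
theorem pvLoopA_eq_pvFirst (c : Int → Bool)
    (hmono : ∀ x x' : Int, x ≤ x' → c x = true → c x' = true) :
    ∀ (fuel : Nat) (left right : Int), right - left ≤ (fuel : Int) → left < right →
      c left = false → pvLoopA c fuel left right = pvFirst c (left + 1) right := by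
  intro fuel
  induction fuel with
  | zero => intro left right hf hlr _; omega
  | succ fuel ih =>
    intro left right hf hlr hcl
    rw [pvLoopA]
    by_cases hbase : left + 1 = right
    · rw [if_pos hbase, hbase, pvFirst_of_ge c right right le_rfl]
    · rw [if_neg hbase]
      have hlr2 : left + 2 ≤ right := by omega
      set mid := (left + right) >>> (1 : Nat) with hmiddef
      have hmid : mid = (left + right) / 2 := by
        simp [hmiddef, Int.shiftRight_eq_div_pow]
      have hmid1 : left < mid := by omega
      have hmid2 : mid < right := by omega
      by_cases hcm : c mid = true
      · rw [if_pos hcm, ih left mid (by omega) hmid1 hcl]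
        exact (pvFirst_cut c mid right hcm (by omega) (mid - (left + 1)).toNat
          (left + 1) rfl (by omega))
      · rw [if_neg hcm]
        have hcmf : c mid = false := by simpa using hcm
        rw [ih mid right (by omega) hmid2 hcmf]
        have hskip : ∀ x, left + 1 ≤ x → x < mid + 1 → c x = false := by
          intro x hx hx'
          by_contra hcx
          exact hcm (hmono x mid (by omega) (by simpa using hcx))
        exact (pvFirst_skip c right (mid + 1 - (left + 1)).toNat (left + 1) (mid + 1)
          rfl (by omega) hskip).symm

-- B's linear scan with fuel running out exactly at 100001 computes pvFirst with fallback 100000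
theorem pvScanB_eq_pvFirst (c : Int → Bool) :
    ∀ (fuel : Nat) (x : Int), x + (fuel : Int) = 100001 →
      pvScanB c fuel x = pvFirst c x 100000 := by
  intro fuel
  induction fuel with
  | zero =>
    intro x hx
    rw [pvScanB, pvFirst_of_ge c x 100000 (by omega)]
  | succ fuel ih =>
    intro x hx
    rw [pvScanB]
    by_cases hend : x = 100000
    · have hfz : fuel = 0 := by omega
      subst hend hfz
      rw [pvFirst_of_ge c 100000 100000 le_rfl]
      by_cases hcx : c 100000 = true
      · rw [if_pos hcx]
      · rw [if_neg hcx, pvScanB]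
    · have hxlt : x < 100000 := by omega
      rw [pvFirst_of_lt c x 100000 hxlt]
      by_cases hcx : c x = true
      · rw [if_pos hcx, if_pos hcx]
      · rw [if_neg hcx, if_neg hcx]
        exact ih (x + 1) (by omega)

-- under Pre_, every term of calc's sum is pointwise antitone in x, so the whole fold is
theorem pvCalc_foldl_mono (diffs times : List Int) (x x' : Int) (hx : x ≤ x')
    (hlen : diffs.length ≤ times.length)
    (hnn : ∀ t ∈ times.take diffs.length, 0 ≤ t) :
    ∀ (l : List Int), (∀ i ∈ l, 0 ≤ i ∧ i < (diffs.length : Int)) →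
      ∀ (y y' : Int), y' ≤ y →
      List.foldl (fun y i =>
          let prev : Int := if i > 0 then PySem.List.pyGetD times (i - 1) 0 else 0
          let diff : Int := PySem.List.pyGetD diffs i 0
          let time : Int := PySem.List.pyGetD times i 0
          y + max 0 (diff - x') * (prev + time) + time) y' l ≤
      List.foldl (fun y i =>
          let prev : Int := if i > 0 then PySem.List.pyGetD times (i - 1) 0 else 0
          let diff : Int := PySem.List.pyGetD diffs i 0
          let time : Int := PySem.List.pyGetD times i 0
          y + max 0 (diff - x) * (prev + time) + time) y l := by
  intro l
  induction l with
  | nil => intro _ y y' hy; simpa using hy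
  | cons i l ihl =>
    intro hmem y y' hy
    simp only [List.foldl_cons]
    apply ihl (fun j hj => hmem j (List.mem_cons_of_mem i hj))
    have hi0 : (0 : Int) ≤ i := (hmem i (List.mem_cons_self)).1
    have hilt : i < (diffs.length : Int) := (hmem i (List.mem_cons_self)).2
    have htimes_nn : ∀ j : Int, 0 ≤ j → j < (diffs.length : Int) →
        0 ≤ PySem.List.pyGetD times j 0 := by
      intro j hj0 hjlt
      rw [PySem.List.pyGetD_eq_getElem times 0 hj0 (by omega)]
      have hb : j.toNat < (List.take diffs.length times).length := by
        simp; omega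
      have hmem' : (List.take diffs.length times)[j.toNat] ∈ List.take diffs.length times :=
        List.getElem_mem hb
      rw [List.getElem_take] at hmem'
      exact hnn _ hmem'
    have hcoef : 0 ≤ (if i > 0 then PySem.List.pyGetD times (i - 1) 0 else 0) +
        PySem.List.pyGetD times i 0 := by
      have ht := htimes_nn i hi0 hilt
      by_cases hi : i > 0
      · have hp := htimes_nn (i - 1) (by omega) (by omega)
        rw [if_pos hi]; omega
      · rw [if_neg hi]; omega
    have hmax : max 0 (PySem.List.pyGetD diffs i 0 - x') ≤
        max 0 (PySem.List.pyGetD diffs i 0 - x) := by omega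
    have := mul_le_mul_of_nonneg_right hmax hcoef
    omega

-- monotonicity of the predicate itself
theorem pvCalc_mono (diffs times : List Int) (limit : Int)
    (hlen : diffs.length ≤ times.length)
    (hnn : ∀ t ∈ times.take diffs.length, 0 ≤ t) :
    ∀ x x' : Int, x ≤ x' → pvCalc diffs times limit x = true →
      pvCalc diffs times limit x' = true := by
  intro x x' hx h
  have hfold := pvCalc_foldl_mono diffs times x x' hx hlen hnn
    (PySem.List.pyRange 0 (diffs.length : Int) 1)
    (fun i hi => by
      rw [PySem.List.mem_pyRange_one] at hi
      exact ⟨hi.1, hi.2⟩)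
    0 0 le_rfl
  simp only [pvCalc, decide_eq_true_eq] at h ⊢
  exact le_trans hfold h

-- ===== VERDICT (by name: the statement is the Claim_ definition above) =====
theorem solution_spec : Claim_equal_solution := by
  intro diffs times limit _ hpre
  unfold Spec_solution solution solution_alt
  set c := pvCalc diffs times limit with hc
  by_cases h1 : c 1 = true
  · rw [if_pos h1, pvScanB, if_pos h1]
  · have h1f : c 1 = false := by simpa using h1
    rw [if_neg h1]
    have hmono := pvCalc_mono diffs times limit hpre.1 hpre.2
    rw [pvLoopA_eq_pvFirst c hmono 100000 1 100000 (by norm_num) (by norm_num) h1f]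
    rw [pvScanB, if_neg h1]
    norm_num
    rw [pvScanB_eq_pvFirst c 99999 2 (by norm_num)]
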